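-- pv_equiv track=rewrite | github.com/MyStarNight/Federated-Learning-Platform | topology2.py | push_time_calculating
-- ===== SOURCE A (Python) =====
-- def push_time_calculating(node_tree):
--     t = 0
--     for value in node_tree.values():
--         node = []
--         for i, j in value:
--             node.append(j)
--         t = t + max(node.count(item) for item in set(node))
--
--     return t
-- ===== SOURCE B (Python) =====
-- def push_time_calculating(node_tree):
--     t = 0
--     for value in node_tree.values():
--         js = [j for _, j in value]
--         best = 0
--         while js:
--             x = js[0]
--             rest = [y for y in js if y != x]
--             best = max(best, len(js) - len(rest))
--             js = rest
--         t += best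
--     return t
-- ===== Notes on version B (the rewrite author's own statement) =====
-- stated objective: alternative
-- what changed: Per group, B repeatedly peels off all copies of the group's current first value with a filter, tracking the largest peeled block as the max frequency, instead of A's set-of-distinct-values plus a list.count rescan per distinct value.
import Mathlib
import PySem

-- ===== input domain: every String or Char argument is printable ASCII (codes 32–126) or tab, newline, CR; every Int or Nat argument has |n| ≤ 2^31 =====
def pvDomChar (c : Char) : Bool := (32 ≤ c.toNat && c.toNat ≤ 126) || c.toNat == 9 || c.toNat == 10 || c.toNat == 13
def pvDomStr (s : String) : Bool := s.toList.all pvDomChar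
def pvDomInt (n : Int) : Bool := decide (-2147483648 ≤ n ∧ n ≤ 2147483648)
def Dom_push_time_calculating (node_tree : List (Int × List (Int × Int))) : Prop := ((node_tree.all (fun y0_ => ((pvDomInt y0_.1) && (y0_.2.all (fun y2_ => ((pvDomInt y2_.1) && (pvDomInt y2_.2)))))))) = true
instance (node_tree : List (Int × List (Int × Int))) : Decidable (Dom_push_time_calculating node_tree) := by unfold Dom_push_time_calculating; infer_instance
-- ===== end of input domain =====

-- B replaces A's "set of distinct values + list.count rescan per distinct value" by a peel loop:
-- repeatedly filter out every copy of the group's current first value, tracking the largest peeled block.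

-- ===== PORT A =====
-- max(node.count(item) for item in set(node)): the max of a bag of ints is independent of the
-- set's (unmodelled) iteration order, so mapping over Set.ofList is exact here.
def push_time_calculating (node_tree : List (Int × List (Int × Int))) : Int :=
  node_tree.foldl (fun t kv =>
    let node : List Int := kv.2.foldl (fun acc ij => acc ++ [ij.2]) []
    t + ((PySem.List.max? ((PySem.Set.ofList node).map (fun item => (PySem.List.count node item : Int))) (fun x => x)).getD 0)) 0

-- ===== PORT B =====
-- the 'while js:' peel loop of Source B, as recursion on js (rest is strictly shorter)
def pvPeel (best : Int) (js : List Int) : Int :=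
  match js with
  | [] => best
  | x :: tl =>
    let rest := (x :: tl).filter (fun y => y != x)
    pvPeel (max best (((x :: tl).length : Int) - (rest.length : Int))) rest
termination_by js.length
decreasing_by
  have h1 : (x :: tl).filter (fun y => y != x) = tl.filter (fun y => y != x) := by simp
  simp only [h1, List.length_cons]
  exact Nat.lt_succ_of_le (List.length_filter_le _ _)

def push_time_calculating_alt (node_tree : List (Int × List (Int × Int))) : Int :=
  node_tree.foldl (fun t kv => t + pvPeel 0 (kv.2.map (·.2))) 0

-- ===== PRECONDITION & SPEC =====
-- Pre_ excludes dicts with an empty group list: there Python A raises ValueError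
-- (max() of an empty sequence).
def Pre_push_time_calculating (node_tree : List (Int × List (Int × Int))) : Prop :=
  ∀ kv ∈ node_tree, kv.2 ≠ []
instance (node_tree : List (Int × List (Int × Int))) : Decidable (Pre_push_time_calculating node_tree) := by unfold Pre_push_time_calculating; infer_instance
def pvWitness_push_time_calculating : (List (Int × List (Int × Int))) := [(1, [(0, 2), (3, 2), (4, 5)]), (2, [(1, 1)])]

def Spec_push_time_calculating (node_tree : List (Int × List (Int × Int))) (out : Int) : Prop := out = push_time_calculating_alt node_tree
instance (node_tree : List (Int × List (Int × Int))) (out : Int) : Decidable (Spec_push_time_calculating node_tree out) := by unfold Spec_push_time_calculating; infer_instance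

-- ===== CLAIM (what is proved, stated in full; the proofs are below) =====
def Claim_equal_push_time_calculating : Prop := ∀ (node_tree : List (Int × List (Int × Int))), Dom_push_time_calculating node_tree → Pre_push_time_calculating node_tree → Spec_push_time_calculating node_tree (push_time_calculating node_tree)

-- ===== LEMMAS AND PROOFS =====

-- A's per-group value, as an expression
def pvAval (node : List Int) : Int :=
  (PySem.List.max? ((PySem.Set.ofList node).map (fun item => (PySem.List.count node item : Int))) (fun x => x)).getD 0

-- folding Set.add skips elements already in the accumulator
theorem pv_foldl_add_mem (x : Int) : ∀ (l acc : List Int), x ∈ acc →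
    l.foldl PySem.Set.add acc = (l.filter (fun y => y != x)).foldl PySem.Set.add acc := by
  intro l
  induction l with
  | nil => intro acc _; rfl
  | cons y t ih =>
    intro acc hx
    by_cases hyx : y = x
    · subst hyx
      have h1 : PySem.Set.add acc y = acc := by
        simp [PySem.Set.add, PySem.Set.contains, hx]
      have h2 : List.filter (fun z => z != y) (y :: t) = List.filter (fun z => z != y) t := by simp
      rw [List.foldl_cons, h1, h2]
      exact ih acc hx
    · have hb : (y != x) = true := by simp [hyx]
      have h2 : List.filter (fun z => z != x) (y :: t) = y :: List.filter (fun z => z != x) t := by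
        simp [List.filter_cons, hb]
      have hmem : x ∈ PySem.Set.add acc y := by
        simp only [PySem.Set.add]; split <;> simp [hx]
      rw [List.foldl_cons, h2, List.foldl_cons]
      exact ih _ hmem

-- an accumulator head not occurring in the list stays the head
theorem pv_foldl_add_cons (x : Int) : ∀ (l s : List Int), x ∉ l →
    l.foldl PySem.Set.add (x :: s) = x :: l.foldl PySem.Set.add s := by
  intro l
  induction l with
  | nil => intro s _; rfl
  | cons y t ih =>
    intro s hx
    have hyx : ¬ (y = x) := fun h => hx (h ▸ List.mem_cons_self ..)
    have hxt : x ∉ t := fun h => hx (List.mem_cons_of_mem _ h)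
    have hadd : PySem.Set.add (x :: s) y = x :: PySem.Set.add s y := by
      by_cases hys : y ∈ s
      · simp [PySem.Set.add, PySem.Set.contains, hys, hyx]
      · simp [PySem.Set.add, PySem.Set.contains, hys, hyx]
    rw [List.foldl_cons, hadd, List.foldl_cons, ih _ hxt]

-- set(x :: t) = x :: set(t with x removed)
theorem pv_ofList_cons (x : Int) (t : List Int) :
    PySem.Set.ofList (x :: t) = x :: PySem.Set.ofList (t.filter (fun y => y != x)) := by
  have h0 : PySem.Set.ofList (x :: t) = t.foldl PySem.Set.add [x] := by
    rw [PySem.Set.ofList_eq_foldl]; rfl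
  rw [h0, pv_foldl_add_mem x t [x] (by simp),
      pv_foldl_add_cons x _ [] (by simp), PySem.Set.ofList_eq_foldl]

-- length bookkeeping: |js| - |js without x| = count of x
theorem pv_len_sub (x : Int) : ∀ js : List Int,
    (js.filter (fun y => y != x)).length + js.count x = js.length := by
  intro js
  induction js with
  | nil => rfl
  | cons y t ih =>
    by_cases h : y = x
    · subst h
      have h2 : List.filter (fun z => z != y) (y :: t) = List.filter (fun z => z != y) t := by simp
      rw [h2, List.count_cons_self, List.length_cons]
      omega
    · have hb : (y != x) = true := by simp [h]
      have h2 : List.filter (fun z => z != x) (y :: t) = y :: List.filter (fun z => z != x) t := by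
        simp [List.filter_cons, hb]
      have h3 : (y :: t).count x = t.count x := List.count_cons_of_ne h
      rw [h2, List.length_cons, h3, List.length_cons]
      omega

-- running max distributes
theorem pv_foldl_max (a : Int) : ∀ (l : List Int) (b : Int),
    l.foldl max (max a b) = max a (l.foldl max b) := by
  intro l
  induction l with
  | nil => intro b; rfl
  | cons y t ih =>
    intro b
    simp only [List.foldl_cons, max_assoc, ih]

-- A's group value unrolled one peel step
theorem pv_aval_cons (x : Int) (t : List Int) :
    pvAval (x :: t) =
      (if ((x :: t).filter (fun y => y != x)).isEmpty then
        (((x :: t).length : Int) - (((x :: t).filter (fun y => y != x)).length : Int))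
      else
        max (((x :: t).length : Int) - (((x :: t).filter (fun y => y != x)).length : Int))
            (pvAval ((x :: t).filter (fun y => y != x)))) := by
  have hfilter : (x :: t).filter (fun y => y != x) = t.filter (fun y => y != x) := by simp
  rw [hfilter]
  have hlen := pv_len_sub x (x :: t)
  rw [hfilter] at hlen
  have hcongr : ∀ i ∈ PySem.Set.ofList (t.filter (fun y => y != x)),
      (PySem.List.count (x :: t) i : Int) = (PySem.List.count (t.filter (fun y => y != x)) i : Int) := by
    intro i hi
    rw [PySem.Set.mem_ofList] at hi
    have hix : (i != x) = true := (List.mem_filter.mp hi).2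
    have hxi : x ≠ i := by
      intro h; subst h; simp at hix
    simp only [PySem.List.count_eq]
    rw [List.count_cons_of_ne hxi]
    have hcf : List.count i (List.filter (fun y => y != x) t) = List.count i t :=
      List.count_filter (p := fun y => y != x) (a := i) (l := t) hix
    exact_mod_cast hcf.symm
  unfold pvAval
  rw [pv_ofList_cons x t, List.map_cons, PySem.List.max?_id_cons, Option.getD_some]
  have hmap : (PySem.Set.ofList (t.filter (fun y => y != x))).map (fun item => (PySem.List.count (x :: t) item : Int))
      = (PySem.Set.ofList (t.filter (fun y => y != x))).map (fun item => (PySem.List.count (t.filter (fun y => y != x)) item : Int)) :=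
    List.map_congr_left hcongr
  rw [hmap]
  have hfx : (PySem.List.count (x :: t) x : Int)
      = ((x :: t).length : Int) - ((t.filter (fun y => y != x)).length : Int) := by
    simp only [PySem.List.count_eq]
    omega
  rw [hfx]
  by_cases hF : t.filter (fun y => y != x) = []
  · rw [hF]
    simp [PySem.Set.ofList]
  · have hcond : ¬((t.filter (fun y => y != x)).isEmpty = true) := by
      rw [List.isEmpty_iff]; exact hF
    rw [if_neg hcond]
    obtain ⟨y, r, hyr⟩ := List.exists_cons_of_ne_nil hF
    rw [hyr, pv_ofList_cons y r, List.map_cons, List.foldl_cons,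
        PySem.List.max?_id_cons, Option.getD_some, pv_foldl_max]

-- B's peel loop computes max of the accumulator with A's group value
theorem pv_peel_eq : ∀ (n : Nat) (node : List Int), node.length ≤ n → node ≠ [] →
    ∀ b : Int, pvPeel b node = max b (pvAval node) := by
  intro n
  induction n with
  | zero =>
    intro node hlen hne
    cases node with
    | nil => exact absurd rfl hne
    | cons _ _ => simp at hlen
  | succ n ih =>
    intro node hlen hne b
    cases node with
    | nil => exact absurd rfl hne
    | cons x tl =>
      simp only [pvPeel]
      rw [pv_aval_cons x tl]
      have h1 : (x :: tl).filter (fun y => y != x) = tl.filter (fun y => y != x) := by simp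
      have hlenr : ((x :: tl).filter (fun y => y != x)).length ≤ n := by
        rw [h1]
        have h2 := List.length_filter_le (fun y => y != x) tl
        simp only [List.length_cons] at hlen
        omega
      by_cases hF : (x :: tl).filter (fun y => y != x) = []
      · rw [hF]
        simp [pvPeel]
      · have hcond : ¬(((x :: tl).filter (fun y => y != x)).isEmpty = true) := by
          rw [List.isEmpty_iff]; exact hF
        rw [if_neg hcond]
        rw [ih ((x :: tl).filter (fun y => y != x)) hlenr hF, max_assoc]

theorem pv_aval_nonneg (x : Int) (t : List Int) : 0 ≤ pvAval (x :: t) := by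
  rw [pv_aval_cons x t]
  have hlf := List.length_filter_le (fun y => y != x) (x :: t)
  split
  · omega
  · exact le_trans (by omega) (le_max_left _ _)

-- the two per-group steps agree on nonempty groups
theorem pv_step_eq (t : Int) (kv : Int × List (Int × Int)) (hne : kv.2 ≠ []) :
    (let node : List Int := kv.2.foldl (fun acc ij => acc ++ [ij.2]) []
     t + ((PySem.List.max? ((PySem.Set.ofList node).map (fun item => (PySem.List.count node item : Int))) (fun x => x)).getD 0))
    = t + pvPeel 0 (kv.2.map (·.2)) := by
  have hnode : kv.2.foldl (fun acc ij => acc ++ [ij.2]) [] = kv.2.map (·.2) := by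
    rw [PySem.List.foldl_append_singleton_eq_map]; rfl
  simp only [hnode]
  rcases hm : kv.2.map (·.2) with _ | ⟨x, tl⟩
  · exact absurd (by simpa using hm) hne
  · rw [hm]
    have hpeel := pv_peel_eq (x :: tl).length (x :: tl) le_rfl (by simp) 0
    rw [hpeel, max_eq_right (pv_aval_nonneg x tl)]
    rfl

-- ===== VERDICT (by name: the statement is the Claim_ definition above) =====
theorem push_time_calculating_spec : Claim_equal_push_time_calculating := by
  intro node_tree _ hpre
  unfold Spec_push_time_calculating push_time_calculating push_time_calculating_alt
  apply PySem.List.foldl_congr_mem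
  intro acc kv hkv
  exact pv_step_eq acc kv (hpre kv hkv)
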